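-- pv_equiv track=rewrite | github.com/BIT-DYN/OpenGraph | script/gen_lane.py | process_indexes
-- ===== SOURCE A (Python) =====
-- def process_indexes(indexes):
--     '''
--     处理列表，保留连续索引中的一个
--     '''
--     processed_indexes = []
--     start_index = None
--     for i in range(len(indexes)):
--         if start_index is None:
--             start_index = indexes[i]
--         elif indexes[i] - indexes[i-1] > 1:  # 如果当前索引与前一个索引不连续
--             middle_index = (indexes[i-1] + start_index) // 2  # 计算连续索引范围内的中间值
--             processed_indexes.append(middle_index)
--             start_index = indexes[i]
--     # 处理最后一个连续索引范围
--     if start_index is not None: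
--         end_index = indexes[-1]
--         middle_index = (end_index + start_index) // 2
--         processed_indexes.append(middle_index)
--     return processed_indexes
-- ===== SOURCE B (Python) =====
-- def process_indexes(indexes):
--     # Pass 1: group into runs, breaking where the gap to the previous element is > 1.
--     runs = []
--     for x in indexes:
--         if runs and x - runs[-1][-1] <= 1:
--             runs[-1].append(x)
--         else:
--             runs.append([x])
--     # Pass 2: midpoint of each run.
--     return [(r[0] + r[-1]) // 2 for r in runs]
-- ===== Notes on version B (the rewrite author's own statement) =====
-- stated objective: simpler
-- what changed: Replaces the index-based single loop with Optional start/previous bookkeeping and a trailing flush by a two-pass decomposition: first group the elements into runs (breaking where the gap exceeds 1), then map each run to its midpoint (first+last)//2.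
import Mathlib
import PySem

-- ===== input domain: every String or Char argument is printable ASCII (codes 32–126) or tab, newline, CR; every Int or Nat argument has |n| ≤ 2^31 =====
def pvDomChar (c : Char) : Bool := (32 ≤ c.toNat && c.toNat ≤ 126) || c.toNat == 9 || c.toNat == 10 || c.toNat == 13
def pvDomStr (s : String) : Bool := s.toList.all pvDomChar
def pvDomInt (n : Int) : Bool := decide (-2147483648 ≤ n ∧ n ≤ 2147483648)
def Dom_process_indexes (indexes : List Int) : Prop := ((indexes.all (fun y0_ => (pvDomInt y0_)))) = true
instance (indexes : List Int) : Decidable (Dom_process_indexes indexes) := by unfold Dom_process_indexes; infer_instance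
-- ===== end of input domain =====

-- B groups the elements into runs in one pass, then maps each run to its midpoint;
-- same values as A's single index-based loop, by a plainer two-pass decomposition.

-- ===== PORT A =====
-- A's loop, with the 'start_index is None' first iteration peeled off (start_index is
-- None exactly until the first element); the loop state is (processed, start_index)
-- and 'prev' carries indexes[i-1]. The final flush reads indexes[-1] via pyGet? as A does.
def pvALoop (indexes : List Int) (processed : List Int) (startIdx prev : Int) :
    List Int → List Int × Int
  | [] => (processed, startIdx)
  | y :: ys =>
    if y - prev > 1 then
      pvALoop indexes (processed ++ [PySem.Int.floordiv (prev + startIdx) 2]) y y ys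
    else
      pvALoop indexes processed startIdx y ys

def process_indexes (indexes : List Int) : List Int :=
  match indexes with
  | [] => []  -- start_index stays None: final 'if' not taken
  | x :: rest =>
    let st := pvALoop indexes [] x x rest
    st.1 ++ [PySem.Int.floordiv (((PySem.List.pyGet? indexes (-1)).getD 0) + st.2) 2]

-- ===== PORT B =====
-- Pass 1 of Source B: fold the elements into runs (runs[-1].append(x) becomes
-- dropLast ++ [r ++ [x]]); Pass 2: the midpoint comprehension.
def pvBStep (runs : List (List Int)) (x : Int) : List (List Int) :=
  match runs.getLast? with
  | some r =>
    if x - r.getLastD 0 ≤ 1 then runs.dropLast ++ [r ++ [x]] else runs ++ [[x]]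
  | none => [[x]]

def pvRuns (indexes : List Int) : List (List Int) :=
  indexes.foldl pvBStep []

def process_indexes_alt (indexes : List Int) : List Int :=
  (pvRuns indexes).map (fun r => PySem.Int.floordiv (r.headD 0 + r.getLastD 0) 2)

-- ===== PRECONDITION & SPEC =====
def Spec_process_indexes (indexes : List Int) (out : List Int) : Prop := out = process_indexes_alt indexes
instance (indexes : List Int) (out : List Int) : Decidable (Spec_process_indexes indexes out) := by unfold Spec_process_indexes; infer_instance

-- ===== CLAIM (what is proved, stated in full; the proofs are below) =====
def Claim_equal_process_indexes : Prop := ∀ (indexes : List Int), Dom_process_indexes indexes → Spec_process_indexes indexes (process_indexes indexes)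

-- ===== LEMMAS AND PROOFS =====

-- common reference function: result of processing a run that currently starts at
-- `start` and whose previous element is `prev`, with `ys` still to come
def pvSpecRun (start prev : Int) : List Int → List Int
  | [] => [PySem.Int.floordiv (prev + start) 2]
  | y :: ys =>
    if y - prev > 1 then PySem.Int.floordiv (prev + start) 2 :: pvSpecRun y y ys
    else pvSpecRun start y ys

theorem pvALoop_spec (indexes : List Int) :
    ∀ (ys : List Int) (processed : List Int) (start prev : Int),
      (pvALoop indexes processed start prev ys).1 ++
        [PySem.Int.floordiv ((ys.getLastD prev) + (pvALoop indexes processed start prev ys).2) 2]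
      = processed ++ pvSpecRun start prev ys := by
  intro ys
  induction ys with
  | nil => intro processed start prev; simp [pvALoop, pvSpecRun]
  | cons y ys ih =>
    intro processed start prev
    by_cases h : y - prev > 1
    · simp only [pvALoop, pvSpecRun, if_pos h, List.getLastD_cons]
      rw [ih]
      simp
    · simp only [pvALoop, pvSpecRun, if_neg h, List.getLastD_cons]
      exact ih processed start y

theorem pvRuns_spec :
    ∀ (ys : List Int) (runs : List (List Int)) (r : List Int), r ≠ [] →
      (List.foldl pvBStep (runs ++ [r]) ys).map (fun r => PySem.Int.floordiv (r.headD 0 + r.getLastD 0) 2)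
      = runs.map (fun r => PySem.Int.floordiv (r.headD 0 + r.getLastD 0) 2)
          ++ pvSpecRun (r.headD 0) (r.getLastD 0) ys := by
  intro ys
  induction ys with
  | nil =>
    intro runs r hr
    simp [pvSpecRun, Int.add_comm]
  | cons y ys ih =>
    intro runs r hr
    rw [List.foldl_cons]
    have hstep : pvBStep (runs ++ [r]) y =
        if y - r.getLastD 0 ≤ 1 then runs ++ [r ++ [y]] else (runs ++ [r]) ++ [[y]] := by
      unfold pvBStep
      simp only [List.getLast?_append, List.getLast?_singleton, Option.some_or,
        List.dropLast_concat]
    rw [hstep]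
    by_cases h : y - r.getLastD 0 ≤ 1
    · rw [if_pos h]
      rw [ih runs (r ++ [y]) (by simp)]
      have h1 : (r ++ [y]).headD 0 = r.headD 0 := by cases r with | nil => exact absurd rfl hr | cons a l => simp
      have h2 : (r ++ [y]).getLastD 0 = y := by simp
      rw [h1, h2]
      have hcond : ¬ (y - r.getLastD 0 > 1) := by omega
      conv_rhs => rw [pvSpecRun]
      rw [if_neg hcond]
    · rw [if_neg h]
      rw [ih (runs ++ [r]) [y] (by simp)]
      have hcond : y - r.getLastD 0 > 1 := by omega
      conv_rhs => rw [pvSpecRun]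
      rw [if_pos hcond]
      simp [Int.add_comm]

theorem process_indexes_eq_specRun (x : Int) (rest : List Int) :
    process_indexes (x :: rest) = pvSpecRun x x rest := by
  have hlast : (PySem.List.pyGet? (x :: rest) (-1)).getD 0 = rest.getLastD x := by
    rw [PySem.List.pyGet?_neg_one]
    cases rest with
    | nil => simp
    | cons a as =>
      rw [List.getLast?_cons_cons, List.getLastD_eq_getLast?]
      cases h : (a :: as).getLast? with
      | none => simp at h
      | some b => simp
  show (pvALoop (x :: rest) [] x x rest).1 ++
      [PySem.Int.floordiv (((PySem.List.pyGet? (x :: rest) (-1)).getD 0) + (pvALoop (x :: rest) [] x x rest).2) 2]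
    = pvSpecRun x x rest
  rw [hlast]
  simpa using pvALoop_spec (x :: rest) rest [] x x

theorem process_indexes_alt_eq_specRun (x : Int) (rest : List Int) :
    process_indexes_alt (x :: rest) = pvSpecRun x x rest := by
  unfold process_indexes_alt pvRuns
  rw [List.foldl_cons]
  have h0 : pvBStep [] x = [] ++ [[x]] := rfl
  rw [h0, pvRuns_spec rest [] [x] (by simp)]
  simp

-- ===== VERDICT (by name: the statement is the Claim_ definition above) =====
theorem process_indexes_spec : Claim_equal_process_indexes := by
  intro indexes _
  unfold Spec_process_indexes
  cases indexes with
  | nil => rfl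
  | cons x rest => rw [process_indexes_eq_specRun, process_indexes_alt_eq_specRun]
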